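-- pv_equiv track=rewrite | github.com/jamesfolberth/ml_project | src/categories.py | unique_cat
-- ===== SOURCE A (Python) =====
-- from collections import defaultdict
--
-- WORDS = {u'article', u'references', u'sources', u'pages', u'script', u'dmy',
--          u'wikidata', u'maint', u'use', u'links', u'mdy', u'Engvarb', u'cs1'}
--
-- def unique_cat(cat_pages):
--     new_pages = defaultdict(dict)
--     for k, v in cat_pages.items():
--         if v:
--             for j in v:
--                 if all(l not in j.lower() for l in WORDS):
--                     if not k in new_pages:
--                         new_pages[k] = {j}
--                     else:
--                         new_pages[k].update({j})
--     return new_pages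
-- ===== SOURCE B (Python) =====
-- from collections import defaultdict
--
-- WORDS = {u'article', u'references', u'sources', u'pages', u'script', u'dmy',
--          u'wikidata', u'maint', u'use', u'links', u'mdy', u'Engvarb', u'cs1'}
--
-- # Staged keyword-major algorithm: (1) collect the universe of distinct page
-- # strings with their lowercased forms, (2) one pass PER KEYWORD over that
-- # universe marks the bad strings, (3) assemble the dict by set difference.
-- def unique_cat(cat_pages):
--     items = list(cat_pages.items())
--     # stage 1: distinct strings, lowered once each
--     universe = []
--     seen = set()
--     for _, v in items:
--         for j in v:
--             if j not in seen:
--                 seen.add(j)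
--                 universe.append((j, j.lower()))
--     # stage 2: keyword-major marking of bad strings
--     bad = set()
--     for w in WORDS:
--         for j, lj in universe:
--             if w in lj:
--                 bad.add(j)
--     # stage 3: assemble the result from the surviving strings
--     new_pages = defaultdict(dict)
--     for k, v in items:
--         keep = {j for j in v if j not in bad}
--         if keep:
--             new_pages[k] = keep
--     return new_pages
-- ===== Notes on version B (the rewrite author's own statement) =====
-- stated objective: alternative
-- what changed: A's single string-major pass testing all 13 keywords against each string while incrementally growing per-key sets is replaced by three staged passes: collect the universe of distinct strings (lowercasing each once), sweep it keyword-major to build one global 'bad' set, then assemble the dict per key by membership difference against 'bad'; duplicate-key association lists are excluded by Pre_ since a Python dict argument cannot represent them.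
import Mathlib
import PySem

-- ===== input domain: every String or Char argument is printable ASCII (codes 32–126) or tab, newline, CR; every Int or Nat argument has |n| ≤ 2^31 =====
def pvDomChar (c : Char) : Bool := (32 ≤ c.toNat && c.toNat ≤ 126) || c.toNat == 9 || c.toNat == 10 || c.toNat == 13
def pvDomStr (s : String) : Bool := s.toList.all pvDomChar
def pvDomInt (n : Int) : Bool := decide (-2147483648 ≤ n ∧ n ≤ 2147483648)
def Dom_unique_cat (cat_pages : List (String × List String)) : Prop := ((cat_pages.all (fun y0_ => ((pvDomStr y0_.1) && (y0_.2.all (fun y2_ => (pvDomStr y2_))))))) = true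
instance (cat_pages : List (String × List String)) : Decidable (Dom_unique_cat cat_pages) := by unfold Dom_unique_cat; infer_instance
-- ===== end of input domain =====

-- B replaces A's string-major pass (13 substring tests per string, per-key incremental
-- set building) by three staged passes: a universe of distinct strings lowered once,
-- a keyword-major sweep marking a global 'bad' set, then per-key assembly (objective: alternative).

def pvWords : List String :=
  ["article", "references", "sources", "pages", "script", "dmy",
   "wikidata", "maint", "use", "links", "mdy", "Engvarb", "cs1"]

-- ===== PORT A =====
def unique_cat (cat_pages : List (String × List String)) : List (String × List String) :=
  (cat_pages.foldl
    (fun (new_pages : PySem.Dict String (List String)) kv =>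
      if kv.2.isEmpty then new_pages
      else
        kv.2.foldl
          (fun np j =>
            if pvWords.all (fun l => !PySem.Str.isIn l (PySem.Str.lower j)) then
              if !np.contains kv.1 then np.insert kv.1 (PySem.Set.ofList [j])
              else np.modify kv.1 PySem.Set.empty (fun s => PySem.Set.update s [j])
            else np)
          new_pages)
    PySem.Dict.empty).items

-- ===== PORT B =====
def unique_cat_alt (cat_pages : List (String × List String)) : List (String × List String) :=
  -- stage 1: universe of distinct strings, each paired with its lowering, first-seen order
  let uni :=
    (cat_pages.foldl
      (fun (acc : PySem.Set String × List (String × String)) kv =>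
        kv.2.foldl
          (fun acc j =>
            if !(PySem.Set.contains acc.1 j) then
              (PySem.Set.add acc.1 j, acc.2 ++ [(j, PySem.Str.lower j)])
            else acc)
          acc)
      ((PySem.Set.empty : PySem.Set String), ([] : List (String × String)))).2
  -- stage 2: keyword-major sweep marking bad strings
  let bad :=
    pvWords.foldl
      (fun (bad : PySem.Set String) w =>
        uni.foldl
          (fun bad jl => if PySem.Str.isIn w jl.2 then PySem.Set.add bad jl.1 else bad)
          bad)
      (PySem.Set.empty : PySem.Set String)
  -- stage 3: assemble the result from surviving strings
  (cat_pages.foldl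
    (fun (np : PySem.Dict String (List String)) kv =>
      let keep := PySem.Set.ofList (kv.2.filter (fun j => !(PySem.Set.contains bad j)))
      if keep.isEmpty then np else np.insert kv.1 keep)
    PySem.Dict.empty).items

-- ===== PRECONDITION & SPEC =====
-- Pre_ excludes association lists with duplicate keys: a Python dict argument cannot
-- represent them, so A's behaviour there is not defined by the source.
def Pre_unique_cat (cat_pages : List (String × List String)) : Prop :=
  (cat_pages.map Prod.fst).Nodup
instance (cat_pages : List (String × List String)) : Decidable (Pre_unique_cat cat_pages) := by
  unfold Pre_unique_cat; infer_instance

def pvWitness_unique_cat : (List (String × List String)) :=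
  [("a", ["hello", "Use dmy dates"]), ("b", []), ("c", ["hello", "world"])]

def Spec_unique_cat (cat_pages : List (String × List String)) (out : List (String × List String)) : Prop := out = unique_cat_alt cat_pages
instance (cat_pages : List (String × List String)) (out : List (String × List String)) : Decidable (Spec_unique_cat cat_pages out) := by unfold Spec_unique_cat; infer_instance

-- ===== CLAIM (what is proved, stated in full; the proofs are below) =====
def Claim_equal_unique_cat : Prop := ∀ (cat_pages : List (String × List String)), Dom_unique_cat cat_pages → Pre_unique_cat cat_pages → Spec_unique_cat cat_pages (unique_cat cat_pages)

-- ===== LEMMAS AND PROOFS =====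

-- proof-side names (definitionally equal to the inline code of the two ports)
def pvOk (j : String) : Bool :=
  pvWords.all (fun l => !PySem.Str.isIn l (PySem.Str.lower j))

def pvKeywordHit (j : String) : Bool :=
  pvWords.any (fun w => PySem.Str.isIn w (PySem.Str.lower j))

def pvKeep (v : List String) : PySem.Set String :=
  PySem.Set.ofList (v.filter (fun j => !pvKeywordHit j))

theorem ok_eq_not_hit (j : String) : pvOk j = !pvKeywordHit j := by
  simp [pvOk, pvKeywordHit, List.all_eq_not_any_not]

-- ---- names for A's loop bodies ----
def aStep (k : String) (np : PySem.Dict String (List String)) (j : String) :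
    PySem.Dict String (List String) :=
  if pvOk j then
    if !np.contains k then np.insert k (PySem.Set.ofList [j])
    else np.modify k PySem.Set.empty (fun s => PySem.Set.update s [j])
  else np

def aOuter (np : PySem.Dict String (List String)) (kv : String × List String) :
    PySem.Dict String (List String) :=
  if kv.2.isEmpty then np else kv.2.foldl (aStep kv.1) np

-- ---- names for B's loop bodies ----
def pvPair (j : String) : String × String := (j, PySem.Str.lower j)

def uniStep (acc : PySem.Set String × List (String × String)) (j : String) :
    PySem.Set String × List (String × String) :=
  if !(PySem.Set.contains acc.1 j) then (PySem.Set.add acc.1 j, acc.2 ++ [pvPair j]) else acc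

def uniOuter (acc : PySem.Set String × List (String × String)) (kv : String × List String) :
    PySem.Set String × List (String × String) :=
  kv.2.foldl uniStep acc

def badStep (w : String) (bad : PySem.Set String) (jl : String × String) : PySem.Set String :=
  if PySem.Str.isIn w jl.2 then PySem.Set.add bad jl.1 else bad

def badOuter (uni : List (String × String)) (bad : PySem.Set String) (w : String) :
    PySem.Set String :=
  uni.foldl (badStep w) bad

def bStepBad (bad : PySem.Set String) (np : PySem.Dict String (List String))
    (kv : String × List String) : PySem.Dict String (List String) :=
  let keep := PySem.Set.ofList (kv.2.filter (fun j => !(PySem.Set.contains bad j)))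
  if keep.isEmpty then np else np.insert kv.1 keep

-- the reference step B's assembly fold reduces to once 'bad' is characterised
def bStep (np : PySem.Dict String (List String)) (kv : String × List String) :
    PySem.Dict String (List String) :=
  if (pvKeep kv.2).isEmpty then np else np.insert kv.1 (pvKeep kv.2)

-- the closed-form value both folds append to the accumulator
def pureList (cp : List (String × List String)) : List (String × List String) :=
  cp.filterMap (fun kv => if (pvKeep kv.2).isEmpty then none else some (kv.1, pvKeep kv.2))

-- ---------- stage 1: the universe list is the map of the seen set ----------
theorem uni_inner (v : List String) (s : PySem.Set String) :
    v.foldl uniStep (s, s.map pvPair)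
      = (PySem.Set.update s v, (PySem.Set.update s v).map pvPair) := by
  induction v generalizing s with
  | nil => simp [PySem.Set.update]
  | cons j v ih =>
    rw [List.foldl_cons, PySem.Set.update_cons]
    by_cases hm : j ∈ s
    · rw [show uniStep (s, s.map pvPair) j = (s, s.map pvPair) from by
            simp [uniStep, hm],
          PySem.Set.add_of_mem hm]
      exact ih s
    · rw [show uniStep (s, s.map pvPair) j = (PySem.Set.add s j, (PySem.Set.add s j).map pvPair) from by
            simp [uniStep, hm, pvPair]]
      exact ih (PySem.Set.add s j)

def pvUfold (cp : List (String × List String)) (s : PySem.Set String) : PySem.Set String :=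
  cp.foldl (fun s kv => PySem.Set.update s kv.2) s

theorem uni_outer (cp : List (String × List String)) (s : PySem.Set String) :
    cp.foldl uniOuter (s, s.map pvPair)
      = (pvUfold cp s, (pvUfold cp s).map pvPair) := by
  induction cp generalizing s with
  | nil => rfl
  | cons kv cp ih =>
    rw [List.foldl_cons, show uniOuter (s, s.map pvPair) kv
          = (PySem.Set.update s kv.2, (PySem.Set.update s kv.2).map pvPair) from
        uni_inner kv.2 s]
    exact ih (PySem.Set.update s kv.2)

def pvU (cp : List (String × List String)) : PySem.Set String :=
  pvUfold cp PySem.Set.empty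

theorem mem_pvUfold (cp : List (String × List String)) (s : PySem.Set String) (x : String) :
    x ∈ pvUfold cp s ↔ x ∈ s ∨ ∃ kv ∈ cp, x ∈ kv.2 := by
  induction cp generalizing s with
  | nil => simp [pvUfold]
  | cons kv cp ih =>
    rw [show pvUfold (kv :: cp) s = pvUfold cp (PySem.Set.update s kv.2) from rfl, ih,
      PySem.Set.mem_update]
    constructor
    · rintro ((h | h) | ⟨p, hp, hx⟩)
      · exact Or.inl h
      · exact Or.inr ⟨kv, by simp, h⟩
      · exact Or.inr ⟨p, by simp [hp], hx⟩
    · rintro (h | ⟨p, hp, hx⟩)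
      · exact Or.inl (Or.inl h)
      · rcases List.mem_cons.mp hp with he | hp'
        · exact Or.inl (Or.inr (he ▸ hx))
        · exact Or.inr ⟨p, hp', hx⟩

-- ---------- stage 2: membership in the bad set ----------
theorem mem_bad_inner (w : String) (l : List (String × String)) (b : PySem.Set String)
    (x : String) :
    x ∈ l.foldl (badStep w) b ↔ x ∈ b ∨ ∃ jl ∈ l, PySem.Str.isIn w jl.2 = true ∧ x = jl.1 := by
  induction l generalizing b with
  | nil => simp
  | cons jl l ih =>
    rw [List.foldl_cons, ih]
    by_cases hw : PySem.Str.isIn w jl.2 = true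
    · rw [show badStep w b jl = PySem.Set.add b jl.1 from by unfold badStep; rw [if_pos hw]]
      rw [PySem.Set.mem_add]
      constructor
      · rintro ((h | h) | ⟨p, hp, hq, hx⟩)
        · exact Or.inl h
        · exact Or.inr ⟨jl, by simp, hw, h⟩
        · exact Or.inr ⟨p, by simp [hp], hq, hx⟩
      · rintro (h | ⟨p, hp, hq, hx⟩)
        · exact Or.inl (Or.inl h)
        · rcases List.mem_cons.mp hp with he | hp'
          · exact Or.inl (Or.inr (he ▸ hx))
          · exact Or.inr ⟨p, hp', hq, hx⟩
    · rw [show badStep w b jl = b from by unfold badStep; rw [if_neg hw]]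
      constructor
      · rintro (h | ⟨p, hp, hq, hx⟩)
        · exact Or.inl h
        · exact Or.inr ⟨p, by simp [hp], hq, hx⟩
      · rintro (h | ⟨p, hp, hq, hx⟩)
        · exact Or.inl h
        · rcases List.mem_cons.mp hp with he | hp'
          · exact absurd (he ▸ hq) hw
          · exact Or.inr ⟨p, hp', hq, hx⟩

theorem mem_bad_outer (ws : List String) (uni : List (String × String)) (b : PySem.Set String)
    (x : String) :
    x ∈ ws.foldl (badOuter uni) b
      ↔ x ∈ b ∨ ∃ w ∈ ws, ∃ jl ∈ uni, PySem.Str.isIn w jl.2 = true ∧ x = jl.1 := by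
  induction ws generalizing b with
  | nil => simp
  | cons w ws ih =>
    rw [List.foldl_cons, ih, show badOuter uni b w = uni.foldl (badStep w) b from rfl,
      mem_bad_inner]
    constructor
    · rintro ((h | h) | ⟨w', hw', h⟩)
      · exact Or.inl h
      · exact Or.inr ⟨w, by simp, h⟩
      · exact Or.inr ⟨w', by simp [hw'], h⟩
    · rintro (h | ⟨w', hw', h⟩)
      · exact Or.inl (Or.inl h)
      · rcases List.mem_cons.mp hw' with he | hw''
        · exact Or.inl (Or.inr (he ▸ h))
        · exact Or.inr ⟨w', hw'', h⟩

def pvBad (cp : List (String × List String)) : PySem.Set String :=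
  pvWords.foldl (badOuter ((pvU cp).map pvPair)) PySem.Set.empty

theorem mem_pvBad (cp : List (String × List String)) (x : String) :
    x ∈ pvBad cp ↔ x ∈ pvU cp ∧ pvKeywordHit x = true := by
  rw [pvBad, mem_bad_outer]
  constructor
  · rintro (h | ⟨w, hw, jl, hjl, hq, hx⟩)
    · exact absurd h (by simp [PySem.Set.empty])
    · rcases List.mem_map.mp hjl with ⟨j, hj, he⟩
      subst hx
      rw [← he] at hq ⊢
      exact ⟨hj, List.any_eq_true.mpr ⟨w, hw, hq⟩⟩
  · rintro ⟨hu, hhit⟩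
    rcases List.any_eq_true.mp hhit with ⟨w, hw, hq⟩
    exact Or.inr ⟨w, hw, pvPair x, List.mem_map_of_mem hu, hq, rfl⟩

theorem contains_pvBad (cp : List (String × List String)) (j : String)
    (hj : ∃ kv ∈ cp, j ∈ kv.2) :
    PySem.Set.contains (pvBad cp) j = pvKeywordHit j := by
  have hu : j ∈ pvU cp := (mem_pvUfold cp PySem.Set.empty j).mpr
    (Or.inr hj)
  cases hh : pvKeywordHit j
  · cases hc : PySem.Set.contains (pvBad cp) j
    · rfl
    · have hmem : j ∈ pvBad cp := by simpa using hc
      have := (mem_pvBad cp j).mp hmem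
      rw [hh] at this
      exact absurd this.2 (by simp)
  · have hmem : j ∈ pvBad cp := (mem_pvBad cp j).mpr ⟨hu, hh⟩
    simpa using hmem

-- ---------- stage 3 reduces to the reference fold ----------
theorem bfold_items (cp : List (String × List String))
    (np : PySem.Dict String (List String))
    (hnd : (cp.map Prod.fst).Nodup)
    (habs : ∀ p ∈ cp, np.contains p.1 = false) :
    (cp.foldl bStep np).items = np.items ++ pureList cp := by
  induction cp generalizing np with
  | nil => simp [pureList]
  | cons kv cp ih =>
    simp only [List.map_cons, List.nodup_cons] at hnd
    have hnp : np.contains kv.1 = false := habs kv (by simp)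
    have habs' : ∀ p ∈ cp, np.contains p.1 = false := fun p hp => habs p (by simp [hp])
    rw [List.foldl_cons]
    cases hke : (pvKeep kv.2).isEmpty with
    | true =>
      rw [show bStep np kv = np from by simp only [bStep, hke, if_true],
        ih np hnd.2 habs']
      have hknil : pvKeep kv.2 = [] := by simpa using hke
      simp [pureList, hknil]
    | false =>
      rw [show bStep np kv = np.insert kv.1 (pvKeep kv.2) from by
          simp only [bStep, hke, Bool.false_eq_true, if_false]]
      have habs'' : ∀ p ∈ cp, ((np.insert kv.1 (pvKeep kv.2)).contains p.1) = false := by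
        intro p hp
        rw [PySem.Dict.contains_insert]
        have hne : p.1 ≠ kv.1 := by
          intro he
          exact hnd.1 (he ▸ List.mem_map_of_mem hp)
        simp [hne, habs' p hp]
      have hkne : pvKeep kv.2 ≠ [] := by simpa using hke
      rw [ih _ hnd.2 habs'',
        PySem.Dict.items_insert_of_not_contains _ _ hnp]
      simp [pureList, hkne]

-- ---------- A-side lemmas ----------
theorem modify_insert_fresh {κ ν : Type} [BEq κ] [LawfulBEq κ]
    (d : PySem.Dict κ ν) (k : κ) (s d0 : ν) (f : ν → ν) :
    (d.insert k s).modify k d0 f = d.insert k (f s) := by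
  unfold PySem.Dict.modify
  rw [PySem.Dict.getD_insert_self, PySem.Dict.insert_insert_self]

theorem inner_present (k : String) (v : List String)
    (np : PySem.Dict String (List String)) (s : List String) :
    v.foldl (aStep k) (np.insert k s)
      = np.insert k (PySem.Set.update s (v.filter pvOk)) := by
  induction v generalizing s with
  | nil => rfl
  | cons j v ih =>
    cases hok : pvOk j with
    | true =>
      rw [List.foldl_cons,
        show aStep k (np.insert k s) j = np.insert k (PySem.Set.update s [j]) from by
          simp only [aStep, hok, if_true, PySem.Dict.contains_insert_self, Bool.not_true,
            Bool.false_eq_true, if_false]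
          exact modify_insert_fresh np k s PySem.Set.empty _,
        ih (PySem.Set.update s [j]), List.filter_cons, if_pos hok]
      rfl
    | false =>
      rw [List.foldl_cons,
        show aStep k (np.insert k s) j = np.insert k s from by
          simp only [aStep, hok, Bool.false_eq_true, if_false],
        ih s, List.filter_cons, if_neg (show ¬(pvOk j = true) by simp [hok])]

theorem add_ne_nil (s : PySem.Set String) (x : String) (h : s ≠ []) :
    PySem.Set.add s x ≠ [] := by
  unfold PySem.Set.add
  split
  · exact h
  · simp

theorem foldl_add_ne_nil (l : List String) (s : PySem.Set String) (h : s ≠ []) :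
    List.foldl PySem.Set.add s l ≠ [] := by
  induction l generalizing s with
  | nil => exact h
  | cons x l ih => exact ih _ (add_ne_nil s x h)

theorem ofList_ne_nil (x : String) (l : List String) :
    PySem.Set.ofList (x :: l) ≠ [] := by
  show List.foldl PySem.Set.add PySem.Set.empty (x :: l) ≠ []
  rw [List.foldl_cons]
  apply foldl_add_ne_nil
  unfold PySem.Set.add PySem.Set.empty
  split <;> simp_all

theorem inner_absent (k : String) (v : List String)
    (np : PySem.Dict String (List String)) (h : np.contains k = false) :
    v.foldl (aStep k) np
      = (if (v.filter pvOk).isEmpty then np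
         else np.insert k (PySem.Set.ofList (v.filter pvOk))) := by
  induction v with
  | nil => rfl
  | cons j v ih =>
    cases hok : pvOk j with
    | true =>
      rw [List.foldl_cons,
        show aStep k np j = np.insert k (PySem.Set.ofList [j]) from by
          simp only [aStep, hok, if_true, h, Bool.not_false],
        inner_present k v np (PySem.Set.ofList [j]), List.filter_cons, if_pos hok]
      rw [if_neg (show ¬((j :: List.filter pvOk v).isEmpty = true) by simp)]
      rfl
    | false =>
      rw [List.foldl_cons,
        show aStep k np j = np from by simp only [aStep, hok, Bool.false_eq_true, if_false],
        ih, List.filter_cons, if_neg (show ¬(pvOk j = true) by simp [hok])]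

theorem afold_items (cp : List (String × List String))
    (np : PySem.Dict String (List String))
    (hnd : (cp.map Prod.fst).Nodup)
    (habs : ∀ p ∈ cp, np.contains p.1 = false) :
    (cp.foldl aOuter np).items = np.items ++ pureList cp := by
  induction cp generalizing np with
  | nil => simp [pureList]
  | cons kv cp ih =>
    simp only [List.map_cons, List.nodup_cons] at hnd
    have hnp : np.contains kv.1 = false := habs kv (by simp)
    have habs' : ∀ p ∈ cp, np.contains p.1 = false := fun p hp => habs p (by simp [hp])
    rw [List.foldl_cons]
    have hfeq : kv.2.filter pvOk = kv.2.filter (fun j => !pvKeywordHit j) := by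
      apply List.filter_congr
      intro a _
      rw [ok_eq_not_hit]
    cases hv : kv.2.isEmpty with
    | true =>
      rw [show aOuter np kv = np from by simp only [aOuter, hv, if_true],
        ih np hnd.2 habs']
      have h2 : kv.2 = [] := by simpa using hv
      have hknil : pvKeep kv.2 = [] := by rw [h2]; rfl
      simp [pureList, hknil]
    | false =>
      rw [show aOuter np kv = kv.2.foldl (aStep kv.1) np from by
          simp only [aOuter, hv, Bool.false_eq_true, if_false],
        inner_absent kv.1 kv.2 np hnp, hfeq]
      cases hke : (pvKeep kv.2).isEmpty with
      | true =>
        have hknil : pvKeep kv.2 = [] := by simpa using hke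
        have hfe : (kv.2.filter (fun j => !pvKeywordHit j)).isEmpty = true := by
          rcases hl : kv.2.filter (fun j => !pvKeywordHit j) with _ | ⟨x, l⟩
          · rfl
          · simp only [pvKeep, hl] at hknil
            exact absurd hknil (ofList_ne_nil x l)
        rw [if_pos hfe, ih np hnd.2 habs']
        simp [pureList, hknil]
      | false =>
        have hkne : pvKeep kv.2 ≠ [] := by simpa using hke
        have hfe : ¬((kv.2.filter (fun j => !pvKeywordHit j)).isEmpty = true) := by
          intro hemp
          have hnil : kv.2.filter (fun j => !pvKeywordHit j) = [] := by simpa using hemp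
          exact hkne (by simp only [pvKeep, hnil]; rfl)
        rw [if_neg hfe]
        have habs'' : ∀ p ∈ cp, ((np.insert kv.1 (pvKeep kv.2)).contains p.1) = false := by
          intro p hp
          rw [PySem.Dict.contains_insert]
          have hne : p.1 ≠ kv.1 := by
            intro he
            exact hnd.1 (he ▸ List.mem_map_of_mem hp)
          simp [hne, habs' p hp]
        have : np.insert kv.1 (PySem.Set.ofList (kv.2.filter (fun j => !pvKeywordHit j)))
            = np.insert kv.1 (pvKeep kv.2) := rfl
        rw [this, ih _ hnd.2 habs'',
          PySem.Dict.items_insert_of_not_contains _ _ hnp]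
        simp [pureList, hkne]

-- ---------- B's port unfolds to the reference fold ----------
theorem alt_eq_bfold (cp : List (String × List String)) :
    unique_cat_alt cp = (cp.foldl bStep PySem.Dict.empty).items := by
  have hdef : unique_cat_alt cp
      = (cp.foldl
          (bStepBad (pvWords.foldl
            (badOuter ((cp.foldl uniOuter ((PySem.Set.empty : PySem.Set String), ([] : List (String × String)))).2))
            PySem.Set.empty))
          PySem.Dict.empty).items := rfl
  have huni : (cp.foldl uniOuter ((PySem.Set.empty : PySem.Set String), ([] : List (String × String)))).2
      = (pvU cp).map pvPair := by
    rw [show (cp.foldl uniOuter ((PySem.Set.empty : PySem.Set String), ([] : List (String × String))))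
        = (pvU cp, (pvU cp).map pvPair) from uni_outer cp PySem.Set.empty]
  have hbad : (pvWords.foldl
      (badOuter ((cp.foldl uniOuter ((PySem.Set.empty : PySem.Set String), ([] : List (String × String)))).2))
      PySem.Set.empty) = pvBad cp := by
    rw [huni]; rfl
  rw [hdef, hbad]
  congr 1
  apply PySem.List.foldl_congr_mem
  intro np kv hkv
  have hfeq : kv.2.filter (fun j => !(PySem.Set.contains (pvBad cp) j))
      = kv.2.filter (fun j => !pvKeywordHit j) := by
    apply List.filter_congr
    intro j hj
    rw [contains_pvBad cp j ⟨kv, hkv, hj⟩]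
  simp only [bStepBad, bStep, pvKeep, hfeq]

-- ===== VERDICT (by name: the statement is the Claim_ definition above) =====
theorem unique_cat_spec : Claim_equal_unique_cat := by
  intro cp _ hpre
  show unique_cat cp = unique_cat_alt cp
  have h1 : (cp.foldl aOuter PySem.Dict.empty).items = PySem.Dict.empty.items ++ pureList cp :=
    afold_items cp PySem.Dict.empty hpre (fun p _ => PySem.Dict.contains_empty _)
  have h2 : (cp.foldl bStep PySem.Dict.empty).items = PySem.Dict.empty.items ++ pureList cp :=
    bfold_items cp PySem.Dict.empty hpre (fun p _ => PySem.Dict.contains_empty _)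
  rw [show unique_cat cp = (cp.foldl aOuter PySem.Dict.empty).items from rfl,
    alt_eq_bfold cp, h1, h2]
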